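-- pv_equiv track=rewrite | github.com/arvearve/crypto | Python_RSA_Impl/rsa.py | num2blocks
-- ===== SOURCE A (Python) =====
-- import math, copy, random
--
-- def num2blocks(l, n):
-- 	"""Take a list of integers(each between 0 and 127), and combines them
-- 	into block size n using base 256. If len(L) % n != 0, use some random
-- 	junk to fill L to make it."""
-- 	# Note that ASCII printable characters range is 0x20 - 0x7E
-- 	returnList = []
-- 	toProcess = copy.copy(l)
-- 	if len(toProcess) % n != 0:
-- 		for i in range(0, n - len(toProcess) % n):
-- 			toProcess.append(0)
-- 	for i in range(0, len(toProcess), n):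
-- 		block = 0
-- 		for j in range(0, n):
-- 			block += toProcess[i + j] << (8 * (n - j - 1))
-- 		returnList.append(block)
-- 	return returnList
-- ===== SOURCE B (Python) =====
-- import copy
--
-- def num2blocks(l, n):
--     """Combine a list of integers into base-256 blocks of size n (padding
--     with zeros to a multiple of n), in ONE streaming pass with a Horner
--     accumulator instead of nested index loops."""
--     padded = copy.copy(l)
--     r = len(padded) % n
--     if r != 0:
--         padded.extend([0] * (n - r))
--     result = []
--     block = 0
--     count = 0
--     for x in padded:
--         block = block * 256 + x
--         count += 1
--         if count == n:
--             result.append(block)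
--             block = 0
--             count = 0
--     return result
-- ===== Notes on version B (the rewrite author's own statement) =====
-- stated objective: alternative
-- what changed: Replaces A's nested index loops (outer over block starts, inner over byte offsets with per-byte shifts) by a single streaming pass over the padded list with a Horner accumulator (block = block*256 + x) and a counter that emits a block every n elements.
import Mathlib
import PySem

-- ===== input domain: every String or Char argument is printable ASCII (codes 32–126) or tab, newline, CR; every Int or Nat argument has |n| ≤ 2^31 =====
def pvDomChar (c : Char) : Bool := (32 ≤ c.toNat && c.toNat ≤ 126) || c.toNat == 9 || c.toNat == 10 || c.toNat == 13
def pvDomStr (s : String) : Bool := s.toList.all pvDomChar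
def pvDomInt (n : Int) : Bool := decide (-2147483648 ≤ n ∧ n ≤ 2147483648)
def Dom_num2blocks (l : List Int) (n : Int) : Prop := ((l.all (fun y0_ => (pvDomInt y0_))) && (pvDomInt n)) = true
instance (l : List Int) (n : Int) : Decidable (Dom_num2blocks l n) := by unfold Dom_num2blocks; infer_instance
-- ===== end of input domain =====

-- B replaces A's nested index loops by one streaming Horner pass with a counter (alternative decomposition, same asymptotic cost).


-- ===== PORT A =====
-- '<<' is ported as '* 2 ^ (…).toNat': exact here since the inner loop only runs for n > 0,
-- where the shift amount 8*(n-j-1) is nonnegative; indexing is in range after padding, so pyGetD's default is never used.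
def num2blocks (l : List Int) (n : Int) : List Int :=
  let toProcess : List Int :=
    if PySem.Int.mod (l.length : Int) n ≠ 0 then
      (PySem.List.pyRange 0 (n - PySem.Int.mod (l.length : Int) n) 1).foldl (fun tp _ => tp ++ [0]) l
    else l
  (PySem.List.pyRange 0 (toProcess.length : Int) n).foldl
    (fun acc i =>
      let block :=
        (PySem.List.pyRange 0 n 1).foldl
          (fun b j => b + PySem.List.pyGetD toProcess (i + j) 0 * 2 ^ (8 * (n - j - 1)).toNat) 0
      acc ++ [block]) []

-- ===== PORT B =====
-- '[0] * (n - r)' is ported as List.replicate (n - r).toNat 0 (Python's list-repeat of a nonpositive count is []).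
def num2blocks_alt (l : List Int) (n : Int) : List Int :=
  let r := PySem.Int.mod (l.length : Int) n
  let padded := if r ≠ 0 then l ++ List.replicate (n - r).toNat 0 else l
  (padded.foldl
    (fun (st : List Int × Int × Int) x =>
      let block := st.2.1 * 256 + x
      let count := st.2.2 + 1
      if count = n then (st.1 ++ [block], 0, 0) else (st.1, block, count))
    ([], 0, 0)).1

-- ===== PRECONDITION & SPEC =====
-- Pre_ excludes exactly n = 0, where A raises ZeroDivisionError (len(l) % n); B raises there too.
def Pre_num2blocks (l : List Int) (n : Int) : Prop := n ≠ 0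
instance (l : List Int) (n : Int) : Decidable (Pre_num2blocks l n) := by unfold Pre_num2blocks; infer_instance
def pvWitness_num2blocks : List Int × Int := ([1, 2, 3], 2)

def Spec_num2blocks (l : List Int) (n : Int) (out : List Int) : Prop := out = num2blocks_alt l n
instance (l : List Int) (n : Int) (out : List Int) : Decidable (Spec_num2blocks l n out) := by unfold Spec_num2blocks; infer_instance

-- ===== CLAIM (what is proved, stated in full; the proofs are below) =====
def Claim_equal_num2blocks : Prop := ∀ (l : List Int) (n : Int), Dom_num2blocks l n → Pre_num2blocks l n → Spec_num2blocks l n (num2blocks l n)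

-- ===== LEMMAS AND PROOFS =====

-- B's step function
def pvStep (n : Int) (st : List Int × Int × Int) (x : Int) : List Int × Int × Int :=
  let block := st.2.1 * 256 + x
  let count := st.2.2 + 1
  if count = n then (st.1 ++ [block], 0, 0) else (st.1, block, count)

-- Horner accumulation over a chunk
def pvHorner (b : Int) (c : List Int) : Int := c.foldl (fun b x => b * 256 + x) b

-- reference chunking: k blocks of size m
def pvBlocks (m : Nat) : Nat → List Int → List Int
  | 0, _ => []
  | k + 1, P => pvHorner 0 (P.take m) :: pvBlocks m k (P.drop m)

theorem pvStep_eq (n : Int) (st : List Int × Int × Int) (x : Int) :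
    pvStep n st x =
      if st.2.2 + 1 = n then (st.1 ++ [st.2.1 * 256 + x], 0, 0)
      else (st.1, st.2.1 * 256 + x, st.2.2 + 1) := rfl

-- padding loop of A is an append of zeros
theorem pvPadA (xs : List Int) : ∀ (l : List Int),
    xs.foldl (fun tp _ => tp ++ [0]) l = l ++ List.replicate xs.length 0 := by
  induction xs with
  | nil => simp
  | cons x xs ih =>
    intro l
    simp only [List.foldl_cons, List.length_cons, ih]
    simp [List.replicate_succ, List.append_assoc]

-- B returns [] for negative n (the counter never reaches n)
theorem pvB_neg (n : Int) (hn : n < 0) : ∀ (P : List Int) (acc : List Int) (b c : Int),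
    0 ≤ c → (P.foldl (pvStep n) (acc, b, c)).1 = acc := by
  intro P
  induction P with
  | nil => intro acc b c _; rfl
  | cons x P ih =>
    intro acc b c hc
    have hne : ¬ (c + 1 = n) := by omega
    simp only [List.foldl_cons, pvStep_eq, hne, if_neg, if_false]
    exact ih acc (b * 256 + x) (c + 1) (by omega)

-- B's fold over a full chunk appends one Horner block and resets
theorem pvB_chunk (n : Int) (hn : 0 < n) : ∀ (c : List Int) (j : Nat) (acc : List Int) (b : Int),
    (j : Int) + c.length = n → 0 < c.length →
    c.foldl (pvStep n) (acc, b, (j : Int)) = (acc ++ [pvHorner b c], 0, 0) := by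
  intro c
  induction c with
  | nil => intro j acc b _ h; simp at h
  | cons x rest ih =>
    intro j acc b hlen _
    simp only [List.foldl_cons, pvStep_eq]
    cases rest with
    | nil =>
      have : (j : Int) + 1 = n := by simp at hlen; omega
      simp [this, pvHorner]
    | cons y t =>
      have hne : ¬ ((j : Int) + 1 = n) := by
        simp only [List.length_cons] at hlen; push_cast at hlen; omega
      rw [if_neg hne]
      have h1 : ((j : Int) + 1) = ((j + 1 : Nat) : Int) := by push_cast; ring
      rw [h1]
      have := ih (j + 1) acc (b * 256 + x)
        (by simp only [List.length_cons] at hlen ⊢; push_cast at hlen ⊢; omega) (by simp)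
      simpa [pvHorner] using this

-- B's fold over a multiple-of-m list produces the reference chunking
theorem pvB_blocks (n : Int) (hn : 0 < n) (m : Nat) (hm : (m : Int) = n) :
    ∀ (k : Nat) (P : List Int) (acc : List Int), P.length = m * k →
    (P.foldl (pvStep n) (acc, 0, 0)).1 = acc ++ pvBlocks m k P := by
  intro k
  induction k with
  | zero =>
    intro P acc h
    have : P = [] := List.eq_nil_of_length_eq_zero (by omega)
    simp [this, pvBlocks]
  | succ k ih =>
    intro P acc h
    have hm0 : 0 < m := by omega
    have hle : m ≤ P.length := by
      rw [h]; exact Nat.le_mul_of_pos_right m (Nat.succ_pos k)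
    have htake : (P.take m).length = m := by
      simp [List.length_take]; omega
    have hP : P = P.take m ++ P.drop m := (List.take_append_drop m P).symm
    conv_lhs => rw [hP]
    rw [List.foldl_append]
    have h0 : (0 : Int) = ((0 : Nat) : Int) := rfl
    have hchunk := pvB_chunk n hn (P.take m) 0 acc 0
      (by rw [htake]; simpa using hm) (by omega)
    simp only [Nat.cast_zero] at hchunk
    rw [hchunk]
    rw [ih (P.drop m) (acc ++ [pvHorner 0 (P.take m)]) (by simp [List.length_drop, h, Nat.mul_succ])]
    simp [pvBlocks, List.append_assoc]

-- hornerAux with nonzero seed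
theorem pvHorner_seed : ∀ (c : List Int) (b : Int),
    pvHorner b c = b * 256 ^ c.length + pvHorner 0 c := by
  intro c
  induction c with
  | nil => intro b; simp [pvHorner]
  | cons x rest ih =>
    intro b
    simp only [pvHorner, List.foldl_cons, List.length_cons] at *
    rw [ih (b * 256 + x), ih (0 * 256 + x)]
    ring

-- weighted index-sum equals Horner
theorem pvSum_horner : ∀ (c : List Int),
    ((List.range c.length).map (fun j => c.getD j 0 * 256 ^ (c.length - 1 - j))).sum
      = pvHorner 0 c := by
  intro c
  induction c with
  | nil => simp [pvHorner]
  | cons x rest ih =>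
    rw [List.length_cons, List.range_succ_eq_map]
    simp only [List.map_cons, List.map_map, List.sum_cons]
    have h1 : ∀ j : Nat, ((fun j => (x :: rest).getD j 0 * 256 ^ (rest.length + 1 - 1 - j)) ∘ Nat.succ) j
        = rest.getD j 0 * 256 ^ (rest.length - 1 - j) := by
      intro j; simp [Function.comp]; omega
    rw [List.map_congr_left (fun j _ => h1 j)]
    rw [ih]
    have : pvHorner 0 (x :: rest) = x * 256 ^ rest.length + pvHorner 0 rest := by
      simp only [pvHorner, List.foldl_cons]
      have := pvHorner_seed rest x
      simpa [pvHorner] using this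
    rw [this]
    simp

-- A's inner loop as a function of the list and block start
def pvBlockAt (n : Int) (Q : List Int) (i : Int) : Int :=
  (PySem.List.pyRange 0 n 1).foldl
    (fun b j => b + PySem.List.pyGetD Q (i + j) 0 * 2 ^ (8 * (n - j - 1)).toNat) 0

-- appending singletons in a fold is a map
theorem pvFoldMap (g : Int → Int) : ∀ (xs : List Int) (init : List Int),
    xs.foldl (fun acc i => acc ++ [g i]) init = init ++ xs.map g := by
  intro xs
  induction xs with
  | nil => intro init; simp
  | cons x xs ih => intro init; simp [ih, List.append_assoc]

-- range(0, n*k, n) for n > 0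
theorem pvRangeStride (n : Int) (hn : 0 < n) (k : Nat) :
    PySem.List.pyRange 0 (n * (k : Int)) n = (List.range k).map (fun i : Nat => n * (i : Int)) := by
  rw [PySem.List.pyRange_of_pos _ _ hn]
  have hcount : (if (0 : Int) < n * (k : Int) then ((n * (k : Int) - 0 + n - 1) / n).toNat else 0) = k := by
    rcases Nat.eq_zero_or_pos k with h0 | h0
    · subst h0; simp
    · have hlt : (0 : Int) < n * (k : Int) := by positivity
      rw [if_pos hlt]
      have : (n * (k : Int) - 0 + n - 1) = (n - 1) + (k : Int) * n := by ring
      rw [this, Int.add_mul_ediv_right _ _ (by omega)]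
      rw [Int.ediv_eq_zero_of_lt (by omega) (by omega)]
      simp
  rw [hcount]
  exact List.map_congr_left (fun i _ => by ring)

-- shifting one block down is dropping a chunk
theorem pvBlockAt_shift (n : Int) (hn : 0 < n) (m : Nat) (hm : (m : Int) = n)
    (P : List Int) (i : Nat) :
    pvBlockAt n P (n * ((i : Int) + 1)) = pvBlockAt n (P.drop m) (n * (i : Int)) := by
  unfold pvBlockAt
  apply PySem.List.foldl_congr_mem
  intro b j hj
  rcases (PySem.List.mem_pyRange_one).1 hj with ⟨hj0, hjn⟩
  have hidx1 : n * ((i : Int) + 1) + j = ((m * (i + 1) + j.toNat : Nat) : Int) := by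
    push_cast [Int.toNat_of_nonneg hj0, hm]; try ring
  have hidx2 : n * (i : Int) + j = ((m * i + j.toNat : Nat) : Int) := by
    push_cast [Int.toNat_of_nonneg hj0, hm]; try ring
  rw [hidx1, hidx2, PySem.List.pyGetD_natCast, PySem.List.pyGetD_natCast]
  have : m * (i + 1) + j.toNat = m + (m * i + j.toNat) := by ring
  rw [this]
  congr 1
  simp [List.getD_eq_getElem?_getD, List.getElem?_drop]

-- the first block is the Horner value of the first chunk
theorem pvBlockAt_zero (n : Int) (hn : 0 < n) (m : Nat) (hm : (m : Int) = n)
    (P : List Int) (hP : m ≤ P.length) :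
    pvBlockAt n P 0 = pvHorner 0 (P.take m) := by
  unfold pvBlockAt
  have hr : PySem.List.pyRange 0 n 1 = (List.range m).map (fun i : Nat => (i : Int)) := by
    rw [PySem.List.pyRange_one]
    simp [← hm]
  rw [hr, List.foldl_map]
  rw [PySem.List.foldl_add]
  rw [← pvSum_horner (P.take m)]
  have hlen : (P.take m).length = m := by simp [List.length_take]; omega
  rw [hlen, zero_add]
  congr 1
  apply List.map_congr_left
  intro j hj
  have hjm : j < m := List.mem_range.1 hj
  have h1 : (0 : Int) + (j : Int) = ((j : Nat) : Int) := by ring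
  rw [h1, PySem.List.pyGetD_natCast]
  have h2 : (8 * (n - (j : Int) - 1)).toNat = 8 * (m - 1 - j) := by
    rw [← hm]; push_cast; omega
  have h3 : (2 : Int) ^ (8 * (m - 1 - j)) = 256 ^ (m - 1 - j) := by
    rw [pow_mul]; norm_num
  have h4 : (P.take m).getD j 0 = P.getD j 0 := by
    simp [List.getD_eq_getElem?_getD, List.getElem?_take, hjm]
  rw [h2, h3, h4]

-- A's block list equals the reference chunking
theorem pvA_blocks (n : Int) (hn : 0 < n) (m : Nat) (hm : (m : Int) = n) :
    ∀ (k : Nat) (P : List Int), P.length = m * k →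
    (List.range k).map (fun i : Nat => pvBlockAt n P (n * (i : Int))) = pvBlocks m k P := by
  intro k
  induction k with
  | zero => intro P h; simp [pvBlocks]
  | succ k ih =>
    intro P h
    have hm0 : 0 < m := by omega
    have hle : m ≤ P.length := by
      rw [h]; exact Nat.le_mul_of_pos_right m (Nat.succ_pos k)
    rw [List.range_succ_eq_map]
    simp only [List.map_cons, List.map_map]
    have hz : pvBlockAt n P (n * ((0 : Nat) : Int)) = pvHorner 0 (P.take m) := by
      simpa using pvBlockAt_zero n hn m hm P hle
    have hmap : ∀ i ∈ List.range k,
        ((fun i : Nat => pvBlockAt n P (n * (i : Int))) ∘ Nat.succ) i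
          = pvBlockAt n (P.drop m) (n * (i : Int)) := by
      intro i _
      simp only [Function.comp]
      have : ((i + 1 : Nat) : Int) = (i : Int) + 1 := by push_cast; ring
      rw [this, pvBlockAt_shift n hn m hm]
    rw [List.map_congr_left hmap]
    rw [ih (P.drop m) (by simp [List.length_drop, h, Nat.mul_succ])]
    simpa [pvBlocks] using hz

theorem num2blocks_spec : Claim_equal_num2blocks := by
  intro l n _ hpre
  unfold Spec_num2blocks num2blocks num2blocks_alt Pre_num2blocks at *
  set r := PySem.Int.mod (l.length : Int) n with hr
  set P : List Int := if r ≠ 0 then l ++ List.replicate (n - r).toNat 0 else l with hPdef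
  have hPad : (if r ≠ 0 then
      (PySem.List.pyRange 0 (n - r) 1).foldl (fun tp _ => tp ++ [0]) l
    else l) = P := by
    rw [hPdef]
    split_ifs with h
    · rw [pvPadA, PySem.List.length_pyRange_one]; norm_num
    · rfl
  simp only [hPad]
  have hstep : (fun (st : List Int × Int × Int) (x : Int) =>
      let block := st.2.1 * 256 + x
      let count := st.2.2 + 1
      if count = n then (st.1 ++ [block], 0, 0) else (st.1, block, count)) = pvStep n := rfl
  rw [hstep]
  rcases lt_or_gt_of_ne hpre with hneg | hpos
  · -- n < 0 : both sides are []
    have hA : PySem.List.pyRange 0 (P.length : Int) n = [] := by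
      unfold PySem.List.pyRange
      rw [if_neg hpre]
      have h1 : ¬ (0 : Int) < n := by omega
      have h2 : ¬ (P.length : Int) < 0 := by omega
      simp [h1, h2]
    rw [hA]
    simp only [List.foldl_nil]
    exact (pvB_neg n hneg _ [] 0 0 le_rfl).symm
  · -- n > 0
    set m := n.toNat with hmdef
    have hm : (m : Int) = n := Int.toNat_of_nonneg (by omega)
    have hrem : r = (l.length : Int) % n := by
      rw [hr]
      show Int.fmod _ _ = _
      rw [Int.fmod_eq_emod]
      simp [hpos.le]
    have hr0 : 0 ≤ r := by rw [hrem]; exact Int.emod_nonneg _ (by omega)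
    have hrlt : r < n := by rw [hrem]; exact Int.emod_lt_of_pos _ hpos
    -- P.length is a multiple of m
    obtain ⟨k, hk⟩ : ∃ k : Nat, P.length = m * k := by
      by_cases h : r ≠ 0
      · refine ⟨((l.length : Int) / n + 1).toNat, ?_⟩
        have hq0 : 0 ≤ (l.length : Int) / n := Int.ediv_nonneg (Int.natCast_nonneg _) (by omega)
        have hlen : (P.length : Int) = (l.length : Int) + (n - r) := by
          rw [hPdef, if_pos h]
          push_cast [List.length_append, List.length_replicate,
            Int.toNat_of_nonneg (by omega : (0:Int) ≤ n - r)]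
          try ring
        have heq : (l.length : Int) + (n - r) = n * ((l.length : Int) / n + 1) := by
          have h1 := Int.emod_add_ediv (l.length : Int) n
          rw [← hrem] at h1
          have h2 : n * ((l.length : Int) / n + 1) = n * ((l.length : Int) / n) + n := by ring
          linarith
        apply Nat.cast_injective (R := Int)
        push_cast [Int.toNat_of_nonneg (by omega : (0:Int) ≤ (l.length : Int) / n + 1)]
        rw [hm, hlen]
        exact heq
      · push_neg at h
        refine ⟨((l.length : Int) / n).toNat, ?_⟩
        have hlen : (P.length : Int) = (l.length : Int) := by
          rw [hPdef, if_neg (by simpa using h)]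
        have heq : (l.length : Int) = n * ((l.length : Int) / n) := by
          have h1 := Int.emod_add_ediv (l.length : Int) n
          rw [← hrem] at h1
          linarith
        have hq0 : 0 ≤ (l.length : Int) / n := Int.ediv_nonneg (Int.natCast_nonneg _) (by omega)
        apply Nat.cast_injective (R := Int)
        push_cast [Int.toNat_of_nonneg hq0]
        rw [hm, hlen]
        exact heq
    have hlenInt : (P.length : Int) = n * (k : Int) := by
      rw [hk]; push_cast; rw [hm]
    rw [hlenInt, pvRangeStride n hpos k]
    have hblock : (fun (acc : List Int) (i : Int) =>
        acc ++ [(PySem.List.pyRange 0 n 1).foldl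
          (fun b j => b + PySem.List.pyGetD P (i + j) 0 * 2 ^ (8 * (n - j - 1)).toNat) 0])
        = fun acc i => acc ++ [pvBlockAt n P i] := rfl
    rw [hblock, pvFoldMap (pvBlockAt n P) _ []]
    rw [List.map_map]
    have hcomp : (pvBlockAt n P) ∘ (fun i : Nat => n * (i : Int))
        = fun i : Nat => pvBlockAt n P (n * (i : Int)) := rfl
    rw [hcomp, pvA_blocks n hpos m hm k P hk]
    rw [pvB_blocks n hpos m hm k P [] hk]
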